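-- pv_equiv track=rewrite | github.com/jo-hailu/geezNumProject | getGeezNum.py | getGeez
-- ===== SOURCE A (Python) =====
-- def getGeez(num):
--
--     ## we will generate the geez number from combination of those
--     ones = ["","፩", "፪", "፫", "፬", "፭", "፮", "፯", "፰", "፱"]
--     tens = ["","፲", "፳", "፴", "፵", "፶", "፷", "፸", "፹", "፺", "፻"];
--
--     if(num<10):
--         return ones[num] ## this is easy
--
--     # for number 10-100
--     elif(num>=10 and num<=100):
--         if(num/10 == int(num/10)): # if the number ends with zero
--             return tens[int(num/10)] # its only one charactor from tens list
--         else: # if the number doesn't end with zero its combination of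
--             # the two lists above
--             tensPart = int(num/10) * 10
--             onesPart = num - tensPart
--
--             return getGeez(tensPart) + "" + getGeez(onesPart)
--
--
--      ## for numbers above 100 we split the number into two parts
--      ## convert them independently
--      ## concatnate them with hundreed in geez in middle
--     elif(num>100 and num<10000):
--         ## this is two split the first 2 and second 2 charactors in int
--         firstPart = int(num/100)
--         secondPart = num - firstPart * 100
--         ## then return converted part concatnated
--         return getGeez(firstPart) + "፻" + getGeez(secondPart)
--
--     ## the same with the above .. thus hundreds in the middle
--     elif(num>=10000 and num<10000):
--         firstPart = int(num/10000)
--         secondPart = num - firstPart*10000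
--
--         return getGeez(firstPart) + "፻፻" + getGeez(secondPart)
--     else:
--         return "out of bound"
-- ===== SOURCE B (Python) =====
-- def getGeez(num):
--     ones = ["", "\u1369", "\u136a", "\u136b", "\u136c", "\u136d", "\u136e", "\u136f", "\u1370", "\u1371"]
--     tens = ["", "\u1372", "\u1373", "\u1374", "\u1375", "\u1376", "\u1377", "\u1378", "\u1379", "\u137a", "\u137b"]
--
--     def group(g):  # render a value in 0..100 from the two tables, no recursion
--         return ones[g] if g < 10 else tens[g // 10] + ones[g % 10]
--
--     if num < 10:
--         return ones[num]
--     if num <= 100: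
--         return group(num)
--     if num < 10000:
--         return group(num // 100) + "\u137b" + group(num % 100)
--     return "out of bound"
-- ===== Notes on version B (the rewrite author's own statement) =====
-- stated objective: simpler
-- what changed: B replaces A's self-recursive splitting (recursing on tensPart/onesPart and on the hundreds/remainder parts) with a flat, non-recursive decomposition: a single helper renders any 0..100 group directly from the two tables with // and %, and numbers 100<n<10000 are two such groups joined by the hundreds glyph.
-- outside the precondition, e.g. on getGeez(-11): A raises IndexError, B raises IndexError
import Mathlib
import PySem

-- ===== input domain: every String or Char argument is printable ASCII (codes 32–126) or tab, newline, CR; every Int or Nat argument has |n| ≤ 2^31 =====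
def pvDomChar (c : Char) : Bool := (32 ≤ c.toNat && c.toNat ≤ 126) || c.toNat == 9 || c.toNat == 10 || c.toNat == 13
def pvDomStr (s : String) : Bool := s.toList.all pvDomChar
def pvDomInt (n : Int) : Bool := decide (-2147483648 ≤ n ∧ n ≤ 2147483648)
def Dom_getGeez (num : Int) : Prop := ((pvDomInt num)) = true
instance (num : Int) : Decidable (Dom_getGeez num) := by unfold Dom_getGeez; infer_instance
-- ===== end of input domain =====

-- B flattens A's self-recursion into one non-recursive group renderer (objective: simpler);
-- equivalence on all num ≥ -10 (A raises IndexError for num ≤ -11).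

-- ===== PORT A =====
def geezOnes : List String := ["", "፩", "፪", "፫", "፬", "፭", "፮", "፯", "፰", "፱"]
def geezTens : List String := ["", "፲", "፳", "፴", "፵", "፶", "፷", "፸", "፹", "፺", "፻"]

-- Literal port of A. Python's `ones[num]` (negative index from the end, IndexError out of
-- range) is PySem.List.pyGetD; the default never fires inside Pre_ (num ≥ -10).
-- `int(num/k)` is exact truncating division here (operands far below 2^53): PySem.Int.truncdiv.
-- The test `num/10 == int(num/10)` is exact float arithmetic at this magnitude, i.e. it holds
-- iff num == int(num/10)*10, which is how it is written here.
def getGeez (num : Int) : String :=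
  if _h1 : num < 10 then
    PySem.List.pyGetD geezOnes num ""
  else if _h2 : num ≥ 10 ∧ num ≤ 100 then
    if num = PySem.Int.truncdiv num 10 * 10 then
      PySem.List.pyGetD geezTens (PySem.Int.truncdiv num 10) ""
    else
      let tensPart := PySem.Int.truncdiv num 10 * 10
      let onesPart := num - tensPart
      getGeez tensPart ++ "" ++ getGeez onesPart
  else if _h3 : num > 100 ∧ num < 10000 then
    let firstPart := PySem.Int.truncdiv num 100
    let secondPart := num - firstPart * 100
    getGeez firstPart ++ "፻" ++ getGeez secondPart
  else if _h4 : num ≥ 10000 ∧ num < 10000 then  -- dead branch, kept literally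
    let firstPart := PySem.Int.truncdiv num 10000
    let secondPart := num - firstPart * 10000
    getGeez firstPart ++ "፻፻" ++ getGeez secondPart
  else
    "out of bound"
termination_by num.toNat
decreasing_by
  all_goals first
  | omega
  | (simp only [PySem.Int.truncdiv] at *
     have h : num.tdiv 10 = num / 10 := Int.tdiv_eq_ediv_of_nonneg (by omega)
     have h2 : num.tdiv 100 = num / 100 := Int.tdiv_eq_ediv_of_nonneg (by omega)
     omega)

-- ===== PORT B =====
-- `group(g)`: renders a value in 0..100 from the two tables, no recursion (// and % are floor).
def geezGroup (g : Int) : String :=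
  if g < 10 then PySem.List.pyGetD geezOnes g ""
  else PySem.List.pyGetD geezTens (PySem.Int.floordiv g 10) ""
         ++ PySem.List.pyGetD geezOnes (PySem.Int.mod g 10) ""

def getGeez_alt (num : Int) : String :=
  if num < 10 then PySem.List.pyGetD geezOnes num ""
  else if num ≤ 100 then geezGroup num
  else if num < 10000 then
    geezGroup (PySem.Int.floordiv num 100) ++ "፻" ++ geezGroup (PySem.Int.mod num 100)
  else "out of bound"

-- ===== PRECONDITION & SPEC =====
-- Pre_ excludes exactly num ≤ -11, where Python A raises IndexError (ones[num] out of range);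
-- B raises there as well.
def Pre_getGeez (num : Int) : Prop := -10 ≤ num
instance (num : Int) : Decidable (Pre_getGeez num) := by unfold Pre_getGeez; infer_instance
def pvWitness_getGeez : Int := (42)

def Spec_getGeez (num : Int) (out : String) : Prop := out = getGeez_alt num
instance (num : Int) (out : String) : Decidable (Spec_getGeez num out) := by unfold Spec_getGeez; infer_instance

-- ===== CLAIM (what is proved, stated in full; the proofs are below) =====
def Claim_equal_getGeez : Prop := ∀ (num : Int), Dom_getGeez num → Pre_getGeez num → Spec_getGeez num (getGeez num)

-- ===== LEMMAS AND PROOFS =====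

theorem truncdiv_eq_ediv (a b : Int) (h : 0 ≤ a) : PySem.Int.truncdiv a b = a / b := by
  simp only [PySem.Int.truncdiv]
  exact Int.tdiv_eq_ediv_of_nonneg h

theorem getGeez_lt10 (num : Int) (h : num < 10) :
    getGeez num = PySem.List.pyGetD geezOnes num "" := by
  rw [getGeez]; rw [dif_pos h]

theorem getGeez_band (num : Int) (h10 : 10 ≤ num) (h100 : num ≤ 100) :
    getGeez num = PySem.List.pyGetD geezTens (num / 10) ""
      ++ PySem.List.pyGetD geezOnes (num % 10) "" := by
  rw [getGeez]
  rw [dif_neg (by omega), dif_pos ⟨h10, h100⟩]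
  rw [truncdiv_eq_ediv num 10 (by omega)]
  by_cases hd : num = num / 10 * 10
  · rw [if_pos hd]
    have hm : num % 10 = 0 := by omega
    rw [hm]
    have : PySem.List.pyGetD geezOnes (0 : Int) "" = "" := by decide
    rw [this, String.append_empty]
  · rw [if_neg hd]
    show getGeez (num / 10 * 10) ++ "" ++ getGeez (num - num / 10 * 10)
      = PySem.List.pyGetD geezTens (num / 10) "" ++ PySem.List.pyGetD geezOnes (num % 10) ""
    have honR : num - num / 10 * 10 = num % 10 := by omega
    rw [honR]
    rw [getGeez_lt10 (num % 10) (by omega)]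
    rw [getGeez]
    rw [dif_neg (by omega), dif_pos ⟨by omega, by omega⟩]
    rw [truncdiv_eq_ediv (num / 10 * 10) 10 (by omega)]
    rw [if_pos (by omega)]
    have hq : num / 10 * 10 / 10 = num / 10 := by omega
    rw [hq, String.append_empty]

theorem getGeez_group (g : Int) (h0 : 0 ≤ g) (h100 : g ≤ 100) :
    getGeez g = geezGroup g := by
  by_cases hg : g < 10
  · rw [getGeez_lt10 g hg, geezGroup, if_pos hg]
  · rw [getGeez_band g (by omega) h100, geezGroup, if_neg hg]
    rw [PySem.Int.floordiv_eq_ediv_of_pos (by omega), PySem.Int.mod_eq_emod_of_pos (by omega)]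

theorem getGeez_spec : Claim_equal_getGeez := by
  intro num _hdom hpre
  unfold Spec_getGeez
  have hpre' : -10 ≤ num := hpre
  by_cases h1 : num < 10
  · rw [getGeez_lt10 num h1, getGeez_alt, if_pos h1]
  · by_cases h2 : num ≤ 100
    · rw [getGeez_alt, if_neg h1, if_pos h2]
      rw [getGeez_group num (by omega) h2]
    · by_cases h3 : num < 10000
      · rw [getGeez]
        rw [dif_neg h1, dif_neg (by omega), dif_pos ⟨by omega, h3⟩]
        rw [getGeez_alt]
        rw [if_neg h1, if_neg h2, if_pos h3]
        rw [truncdiv_eq_ediv num 100 (by omega)]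
        show getGeez (num / 100) ++ "፻" ++ getGeez (num - num / 100 * 100)
          = geezGroup (PySem.Int.floordiv num 100) ++ "፻" ++ geezGroup (PySem.Int.mod num 100)
        have hs : num - num / 100 * 100 = num % 100 := by omega
        rw [hs]
        rw [getGeez_group (num / 100) (by omega) (by omega)]
        rw [getGeez_group (num % 100) (by omega) (by omega)]
        rw [PySem.Int.floordiv_eq_ediv_of_pos (by omega : (0:Int) < 100),
            PySem.Int.mod_eq_emod_of_pos (by omega : (0:Int) < 100)]
      · rw [getGeez]
        rw [dif_neg h1, dif_neg (by omega), dif_neg (by omega), dif_neg (by omega)]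
        rw [getGeez_alt, if_neg h1, if_neg h2, if_neg h3]
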